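-- pv_equiv track=rewrite | github.com/miliar/Code_Jam_Webscraper | solutions_python/Problem_181/1010.py | solve
-- ===== SOURCE A (Python) =====
-- def solve(s):
--     s = list(s)
--     res = []
--     res.append(s[0])
--     for i in range(1, len(s)):
--         if s[i] >= res[0]:
--             res.insert(0, s[i])
--         else:
--             res.append(s[i])
--     return ''.join([str(x) for x in res])
-- ===== SOURCE B (Python) =====
-- def solve(s):
--     records = [ch for i, ch in enumerate(s) if ch == max(s[:i + 1])]
--     others = [ch for i, ch in enumerate(s) if ch != max(s[:i + 1])]
--     return ''.join(reversed(records)) + ''.join(others)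
-- ===== Notes on version B (the rewrite author's own statement) =====
-- stated objective: alternative
-- what changed: Replaces A's stateful loop that mutates one list via insert(0)/append with a stateless declarative characterization: a character belongs to the reversed front block iff it equals the maximum of its inclusive prefix, computed by two comprehensions over enumerate(s) and combined once at the end.
import Mathlib
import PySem

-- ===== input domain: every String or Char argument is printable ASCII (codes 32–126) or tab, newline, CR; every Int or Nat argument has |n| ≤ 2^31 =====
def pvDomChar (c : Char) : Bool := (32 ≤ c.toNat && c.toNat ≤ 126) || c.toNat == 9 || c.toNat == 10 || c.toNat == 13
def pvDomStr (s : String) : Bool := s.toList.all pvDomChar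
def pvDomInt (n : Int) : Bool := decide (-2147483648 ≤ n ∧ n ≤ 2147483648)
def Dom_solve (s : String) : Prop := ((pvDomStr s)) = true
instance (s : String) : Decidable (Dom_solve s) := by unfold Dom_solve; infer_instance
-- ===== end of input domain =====

-- B replaces A's stateful insert(0)/append loop by a stateless characterization (a char goes in
-- front iff it equals the max of its inclusive prefix); return values agree on nonempty strings.

-- ===== PORT A =====
-- A's loop: res starts as [s[0]]; each later char is prepended if >= res[0], else appended
def solveGo (res : List Char) : List Char → List Char
  | [] => res
  | c :: t => if res.headD ' ' ≤ c then solveGo (c :: res) t else solveGo (res ++ [c]) t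

def solve (s : String) : String :=
  match s.toList with
  | [] => ""   -- A raises IndexError here (excluded by Pre_solve)
  | c :: rest => String.mk (solveGo [c] rest)

-- ===== PORT B =====
-- Source B: records = chars with ch == max(s[:i+1]); others = the rest; reversed(records) + others
def solve_alt (s : String) : String :=
  let cs := s.toList
  let records := (PySem.List.enumerate cs 0).filter
      (fun q => PySem.List.max? (PySem.List.slice cs none (some (q.1 + 1))) (fun x => x) == some q.2)
  let others := (PySem.List.enumerate cs 0).filter
      (fun q => !(PySem.List.max? (PySem.List.slice cs none (some (q.1 + 1))) (fun x => x) == some q.2))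
  String.mk ((records.map Prod.snd).reverse ++ others.map Prod.snd)

-- ===== PRECONDITION & SPEC =====
-- A raises IndexError on the empty string (s[0]); only nonempty strings are admitted.
def Pre_solve (s : String) : Prop := s ≠ ""
instance (s : String) : Decidable (Pre_solve s) := by unfold Pre_solve; infer_instance
def pvWitness_solve : String := "ba"

def Spec_solve (s : String) (out : String) : Prop := out = solve_alt s
instance (s : String) (out : String) : Decidable (Spec_solve s out) := by unfold Spec_solve; infer_instance

-- ===== CLAIM (what is proved, stated in full; the proofs are below) =====
def Claim_equal_solve : Prop := ∀ (s : String), Dom_solve s → Pre_solve s → Spec_solve s (solve s)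

-- ===== LEMMAS AND PROOFS =====

-- proof-only middle form: partition of the tail given running max m
def recPart (m : Char) : List Char → List Char × List Char
  | [] => ([], [])
  | c :: t =>
    if m ≤ c then ((c :: (recPart c t).1), (recPart c t).2)
    else ((recPart m t).1, (c :: (recPart m t).2))

-- A's loop in terms of recPart
lemma go_rec (l : List Char) : ∀ (front back : List Char) (m : Char),
    front ≠ [] → front.getLast? = some m →
    solveGo (front.reverse ++ back) l
      = (recPart m l).1.reverse ++ front.reverse ++ (back ++ (recPart m l).2) := by
  induction l with
  | nil => intro front back m _ _; simp [solveGo, recPart]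
  | cons c t ih =>
    intro front back m hne hlast
    have hhead : (front.reverse ++ back).headD ' ' = m := by
      cases hrev : front.reverse with
      | nil => exact absurd (by simpa using hrev) hne
      | cons a l' =>
        have : front.getLast? = some a := by
          rw [← List.head?_reverse, hrev]; rfl
        simp [this.symm.trans hlast |> Option.some.inj]
    simp only [solveGo, hhead, recPart]
    by_cases h : m ≤ c
    · simp only [h, if_pos]
      have := ih (front ++ [c]) back c (by simp) (by simp)
      simpa using this
    · simp only [h, if_neg, not_false_iff]
      have := ih front (back ++ [c]) m hne hlast
      rw [List.append_assoc] at this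
      simpa [List.append_assoc] using this

-- the value of Python max over a nonempty list of chars
lemma max?_val {l : List Char} {m : Char} (h : PySem.List.max? l (fun x => x) = some m) :
    m ∈ l ∧ ∀ y ∈ l, y ≤ m :=
  ⟨PySem.List.max?_mem h, fun y hy => PySem.List.max?_isMax h y hy⟩

lemma max?_some (l : List Char) (h : l ≠ []) :
    ∃ m, PySem.List.max? l (fun x => x) = some m := by
  cases hm : PySem.List.max? l (fun x => x) with
  | none => rw [PySem.List.max?_eq_none_iff] at hm; exact absurd hm h
  | some m => exact ⟨m, rfl⟩

lemma max?_snoc {p : List Char} {m : Char} (c : Char)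
    (h : PySem.List.max? p (fun x => x) = some m) :
    PySem.List.max? (p ++ [c]) (fun x => x) = some (max m c) := by
  obtain ⟨hm, hmax⟩ := max?_val h
  obtain ⟨m', hm'⟩ := max?_some (p ++ [c]) (by simp)
  obtain ⟨hm'mem, hm'max⟩ := max?_val hm'
  have h1 : m' ≤ max m c := by
    rcases List.mem_append.mp hm'mem with h' | h'
    · exact le_trans (hmax _ h') (le_max_left _ _)
    · simp at h'; simp [h']
  have h2 : max m c ≤ m' := by
    exact max_le (hm'max m (by simp [hm])) (hm'max c (by simp))
  rw [hm', le_antisymm h1 h2]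

-- B's two filters in terms of recPart, generalized over the processed prefix p
lemma filt (g l : List Char) : ∀ (p : List Char) (m : Char),
    g = p ++ l → PySem.List.max? p (fun x => x) = some m →
    (((PySem.List.enumerate l ((p.length : Int))).filter
        (fun q => PySem.List.max? (PySem.List.slice g none (some (q.1 + 1))) (fun x => x) == some q.2)).map Prod.snd
      = (recPart m l).1)
    ∧ (((PySem.List.enumerate l ((p.length : Int))).filter
        (fun q => !(PySem.List.max? (PySem.List.slice g none (some (q.1 + 1))) (fun x => x) == some q.2))).map Prod.snd
      = (recPart m l).2) := by
  induction l with
  | nil => intro p m hg hm; simp [PySem.List.enumerate_nil, recPart]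
  | cons c t ih =>
    intro p m hg hm
    have htake : PySem.List.slice g none (some ((p.length : Int) + 1)) = p ++ [c] := by
      have : ((p.length : Int) + 1) = ((p.length + 1 : Nat) : Int) := by push_cast; ring
      rw [this, PySem.List.slice_to_natCast, hg]
      rw [show p.length + 1 = p.length + 1 from rfl]
      rw [List.take_append]
      simp
    have hmax : PySem.List.max? (PySem.List.slice g none (some ((p.length : Int) + 1))) (fun x => x)
        = some (max m c) := by rw [htake]; exact max?_snoc c hm
    have hg' : g = (p ++ [c]) ++ t := by simpa [List.append_assoc] using hg
    have hlen : ((p.length : Int) + 1) = (((p ++ [c]).length : Nat) : Int) := by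
      simp
    rw [PySem.List.enumerate_cons]
    by_cases h : m ≤ c
    · have hc : max m c = c := max_eq_right h
      have ih' := ih (p ++ [c]) c hg' (by rw [max?_snoc c hm, hc])
      rw [← hlen] at ih'
      constructor
      · simp only [List.filter_cons, hmax, hc, recPart, h, if_pos]
        simp [ih'.1]
      · simp only [List.filter_cons, hmax, hc, recPart, h, if_pos]
        simp [ih'.2]
    · have hc : max m c = m := max_eq_left (le_of_not_ge h)
      have ih' := ih (p ++ [c]) m hg' (by rw [max?_snoc c hm, hc])
      rw [← hlen] at ih'
      constructor
      · simp only [List.filter_cons, hmax, recPart, h, if_neg, not_false_iff]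
        have hfalse : ((some (max m c) : Option Char) == some c) = false := by
          rw [beq_eq_false_iff_ne, hc]
          intro hx
          exact h (le_of_eq (Option.some.inj hx))
        simp [hfalse, ih'.1]
      · simp only [List.filter_cons, hmax, recPart, h, if_neg, not_false_iff]
        have hfalse : ((some (max m c) : Option Char) == some c) = false := by
          rw [beq_eq_false_iff_ne, hc]
          intro hx
          exact h (le_of_eq (Option.some.inj hx))
        simp [hfalse, ih'.2]

-- ===== VERDICT (by name: the statement is the Claim_ definition above) =====
theorem solve_spec : Claim_equal_solve := by
  intro s _ hpre
  unfold Spec_solve solve solve_alt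
  cases hs : s.toList with
  | nil => exact absurd (by rw [← s.ofList_toList, hs]) hpre
  | cons c rest =>
    -- A side
    have hA := go_rec rest [c] [] c (by simp) (by simp)
    simp only [List.reverse_cons, List.reverse_nil, List.nil_append, List.append_nil] at hA
    -- B side: first element is always a record, then apply filt with p = [c]
    have hm1 : PySem.List.max? ([c]) (fun x => x) = some c := by
      obtain ⟨m', hm'⟩ := max?_some [c] (by simp)
      obtain ⟨hmem, -⟩ := max?_val hm'
      simp at hmem; rw [hm', hmem]
    have hfilt := filt (c :: rest) rest [c] c (by simp) hm1
    norm_num at hfilt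
    have htake0 : PySem.List.slice (c :: rest) none (some ((0 : Int) + 1)) = [c] := by
      have h1 : ((0 : Int) + 1) = ((1 : Nat) : Int) := by norm_num
      rw [h1, PySem.List.slice_to_natCast]; simp
    have hmax0 : PySem.List.max? (PySem.List.slice (c :: rest) none (some ((0 : Int) + 1))) (fun x => x)
        = some c := by rw [htake0]; exact hm1
    dsimp only
    rw [hA, PySem.List.enumerate_cons]
    simp only [List.filter_cons, hmax0]
    simp [zero_add, hfilt.1, hfilt.2, List.append_assoc]
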